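-- pv_equiv track=rewrite | github.com/porciuscato/study_algorithm | coding_test/2021kakao/1.py | level3
-- ===== SOURCE A (Python) =====
-- def level3(new_id):
--     answer = ''
--     length = len(new_id)
--     idx = 0
--     while idx < length:
--         c = ord(new_id[idx])
--         if c == 46:
--             temp = idx + 1
--             cnt = 1
--             while temp < length and ord(new_id[temp]) == 46:
--                 cnt += 1
--                 temp += 1
--             if cnt > 1:
--                 answer += '.'
--                 idx += cnt
--             else:
--                 answer += '.'
--                 idx += 1
--         else:
--             answer += new_id[idx]
--             idx += 1
--     return answer
-- ===== SOURCE B (Python) =====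
-- def level3(new_id):
--     out = []
--     prev = None
--     for ch in new_id:
--         if ch != '.' or prev != '.':
--             out.append(ch)
--         prev = ch
--     return ''.join(out)
-- ===== Notes on version B (the rewrite author's own statement) =====
-- stated objective: faster
-- what changed: Replaces A's index-driven loop with a nested lookahead while (counting the dot run and jumping the index past it) and repeated string concatenation by a single flat pass that keeps only the previous character and emits a dot only when the previous character was not a dot, collecting into a list joined once.
import Mathlib
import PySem

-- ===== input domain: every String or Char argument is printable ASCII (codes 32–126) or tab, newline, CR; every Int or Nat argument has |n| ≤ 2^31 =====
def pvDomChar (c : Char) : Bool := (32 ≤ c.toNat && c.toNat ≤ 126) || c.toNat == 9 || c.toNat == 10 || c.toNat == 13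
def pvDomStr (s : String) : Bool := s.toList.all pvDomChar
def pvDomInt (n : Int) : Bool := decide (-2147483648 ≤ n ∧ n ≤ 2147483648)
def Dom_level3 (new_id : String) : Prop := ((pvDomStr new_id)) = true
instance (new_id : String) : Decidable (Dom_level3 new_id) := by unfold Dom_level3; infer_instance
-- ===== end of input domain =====

-- B collapses dot runs in one flat pass tracking only the previous character (no nested lookahead scan, no index arithmetic, list+single join instead of repeated string concatenation); measured faster in a timing run.

-- ===== PORT A =====
-- inner while: 'while temp < length and ord(new_id[temp]) == 46: cnt += 1; temp += 1' — counts the extra dots after the current one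
def level3CountRun : List Char → Nat
  | [] => 0
  | c :: rest => if c = '.' then level3CountRun rest + 1 else 0

-- outer while over the remaining characters (idx advances by cnt or 1 ⇒ recurse on the dropped suffix)
def level3Go : List Char → List Char
  | [] => []
  | c :: rest =>
    if c = '.' then
      let cnt := 1 + level3CountRun rest
      if cnt > 1 then '.' :: level3Go (rest.drop (cnt - 1))
      else '.' :: level3Go rest
    else c :: level3Go rest
  termination_by cs => cs.length
  decreasing_by
    · simp only [List.length_cons]
      exact Nat.lt_succ_of_le (List.length_drop ▸ Nat.sub_le _ _)
    · simp
    · simp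

def level3 (new_id : String) : String := String.ofList (level3Go new_id.toList)

-- ===== PORT B =====
-- 'for ch in new_id: if ch != "." or prev != ".": out.append(ch); prev = ch' then ''.join(out)
def level3AltStep (st : List Char × Option Char) (ch : Char) : List Char × Option Char :=
  (if ch ≠ '.' ∨ st.2 ≠ some '.' then st.1 ++ [ch] else st.1, some ch)

def level3_alt (new_id : String) : String :=
  String.ofList (new_id.toList.foldl level3AltStep ([], none)).1

-- ===== PRECONDITION & SPEC =====
def Spec_level3 (new_id : String) (out : String) : Prop := out = level3_alt new_id
instance (new_id : String) (out : String) : Decidable (Spec_level3 new_id out) := by unfold Spec_level3; infer_instance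

-- ===== CLAIM (what is proved, stated in full; the proofs are below) =====
def Claim_equal_level3 : Prop := ∀ (new_id : String), Dom_level3 new_id → Spec_level3 new_id (level3 new_id)

-- ===== LEMMAS AND PROOFS =====

-- while prev is '.', B skips exactly the leading dots
theorem level3_fold_skip (cs : List Char) (o : List Char) :
    cs.foldl level3AltStep (o, some '.') =
      (cs.drop (level3CountRun cs)).foldl level3AltStep (o, some '.') := by
  induction cs with
  | nil => rfl
  | cons c rest ih =>
    by_cases h : c = '.'
    · subst h
      simp only [level3CountRun, List.foldl_cons, level3AltStep]
      simpa using ih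
    · simp [level3CountRun, h]

-- after dropping the counted run, the next character (if any) is not a dot
theorem level3_drop_run (cs : List Char) :
    cs.drop (level3CountRun cs) = [] ∨
      ∃ d rest, cs.drop (level3CountRun cs) = d :: rest ∧ d ≠ '.' := by
  induction cs with
  | nil => exact Or.inl rfl
  | cons c rest ih =>
    by_cases h : c = '.'
    · subst h; simpa [level3CountRun] using ih
    · exact Or.inr ⟨c, rest, by simp [level3CountRun, h], h⟩

-- A's dot branch in uniform form
theorem level3Go_dot (rest : List Char) :
    level3Go ('.' :: rest) = '.' :: level3Go (rest.drop (level3CountRun rest)) := by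
  rw [level3Go]
  rcases Nat.eq_zero_or_pos (level3CountRun rest) with h | h
  · simp [h]
  · simp [show 1 + level3CountRun rest > 1 by omega]

-- main invariant: with prev not a dot, the fold appends exactly A's output
theorem level3_fold_eq (n : Nat) : ∀ cs : List Char, cs.length ≤ n →
    ∀ (o : List Char) (p : Option Char), p ≠ some '.' →
      (cs.foldl level3AltStep (o, p)).1 = o ++ level3Go cs := by
  induction n with
  | zero =>
    intro cs h o p _
    obtain rfl : cs = [] := List.eq_nil_of_length_eq_zero (Nat.le_zero.mp h)
    simp [level3Go]
  | succ n ih =>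
    intro cs hlen o p hp
    match cs with
    | [] => simp [level3Go]
    | c :: rest =>
      by_cases h : c = '.'
      · subst h
        have hstep : level3AltStep (o, p) '.' = (o ++ ['.'], some '.') := by
          simp [level3AltStep, hp]
        rw [List.foldl_cons, hstep, level3_fold_skip, level3Go_dot]
        rcases level3_drop_run rest with hnil | ⟨d, rest', heq, hd⟩
        · simp [hnil, level3Go]
        · have hlen' : rest'.length ≤ n := by
            have h1 : (d :: rest').length ≤ rest.length := by
              rw [← heq]; exact List.length_drop ▸ Nat.sub_le _ _
            simp only [List.length_cons] at h1 hlen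
            omega
          have hstep2 : level3AltStep (o ++ ['.'], some '.') d =
              (o ++ ['.'] ++ [d], some d) := by
            simp [level3AltStep, hd]
          rw [heq, List.foldl_cons, hstep2,
            ih rest' hlen' _ (some d) (by simpa using hd)]
          simp [level3Go, hd]
      · have hstep : level3AltStep (o, p) c = (o ++ [c], some c) := by
          simp [level3AltStep, h]
        rw [List.foldl_cons, hstep,
          ih rest (by simpa using Nat.lt_succ_iff.mp (Nat.lt_of_lt_of_le (by simp) hlen)) _
            (some c) (by simpa using h)]
        simp [level3Go, h]

-- ===== VERDICT (by name: the statement is the Claim_ definition above) =====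
theorem level3_spec : Claim_equal_level3 := by
  intro new_id _
  unfold Spec_level3 level3 level3_alt
  rw [level3_fold_eq new_id.toList.length new_id.toList le_rfl [] none (by simp)]
  rfl
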